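-- pv_equiv track=rewrite | github.com/broadinstitute/gatk | src/main/python/org/broadinstitute/hellbender/permutect/data/base_datum.py | is_repeat
-- ===== SOURCE A (Python) =====
-- def is_repeat(bases: str, unit: str):
--     unit_length = len(unit)
--     if len(bases) % unit_length == 0:
--         num_repeats = len(bases) // len(unit)
--         for repeat_idx in range(num_repeats):
--             start = repeat_idx * unit_length
--             if bases[start: start + unit_length] != unit:
--                 return False
--         return True
--     else:
--         return False
-- ===== SOURCE B (Python) =====
-- def is_repeat(bases: str, unit: str):
--     num_repeats = len(bases) // len(unit)
--     return len(bases) % len(unit) == 0 and bases == unit * num_repeats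
-- ===== Notes on version B (the rewrite author's own statement) =====
-- stated objective: simpler
-- what changed: Replaces the explicit per-chunk slice-comparison loop by a closed-form whole-string reconstruction: bases == unit * (len(bases)//len(unit)) under the same divisibility guard.
import Mathlib
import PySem

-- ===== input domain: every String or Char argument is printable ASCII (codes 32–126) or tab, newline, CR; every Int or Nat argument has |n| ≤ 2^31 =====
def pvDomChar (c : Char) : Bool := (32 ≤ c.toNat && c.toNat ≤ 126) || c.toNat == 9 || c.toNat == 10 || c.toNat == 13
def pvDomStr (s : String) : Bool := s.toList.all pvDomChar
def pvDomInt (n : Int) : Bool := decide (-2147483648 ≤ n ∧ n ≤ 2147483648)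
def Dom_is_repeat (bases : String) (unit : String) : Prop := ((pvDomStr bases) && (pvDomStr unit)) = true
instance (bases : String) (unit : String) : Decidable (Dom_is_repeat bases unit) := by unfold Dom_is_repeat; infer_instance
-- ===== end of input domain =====

-- B replaces A's per-chunk slice-comparison loop by the closed-form reconstruction
-- bases == unit * (len(bases) // len(unit)) under the same divisibility guard (objective: simpler).

-- ===== PORT A =====
def is_repeat (bases : String) (unit : String) : Bool :=
  let unit_length : Int := PySem.Str.len unit
  if PySem.Int.mod (PySem.Str.len bases) unit_length == 0 then
    let num_repeats : Int := PySem.Int.floordiv (PySem.Str.len bases) (PySem.Str.len unit)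
    -- the for-loop with early 'return False' and final 'return True' is List.all over range(num_repeats)
    (PySem.List.pyRange 0 num_repeats 1).all (fun repeat_idx =>
      let start : Int := repeat_idx * unit_length
      PySem.List.slice bases.toList (some start) (some (start + unit_length)) == unit.toList)
  else
    false

-- ===== PORT B =====
def is_repeat_alt (bases : String) (unit : String) : Bool :=
  let num_repeats : Int := PySem.Int.floordiv (PySem.Str.len bases) (PySem.Str.len unit)
  (PySem.Int.mod (PySem.Str.len bases) (PySem.Str.len unit) == 0) &&
    (bases.toList == PySem.List.pyRepeat unit.toList num_repeats)

-- ===== PRECONDITION & SPEC =====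
-- Pre_ excludes exactly the empty unit, on which both A and B raise ZeroDivisionError.
def Pre_is_repeat (bases : String) (unit : String) : Prop := PySem.Str.len unit ≠ 0
instance (bases : String) (unit : String) : Decidable (Pre_is_repeat bases unit) := by
  unfold Pre_is_repeat; infer_instance
def pvWitness_is_repeat : String × String := ("ACGACG", "ACG")

def Spec_is_repeat (bases : String) (unit : String) (out : Bool) : Prop := out = is_repeat_alt bases unit
instance (bases : String) (unit : String) (out : Bool) : Decidable (Spec_is_repeat bases unit out) := by unfold Spec_is_repeat; infer_instance

-- ===== CLAIM (what is proved, stated in full; the proofs are below) =====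
def Claim_equal_is_repeat : Prop := ∀ (bases : String) (unit : String), Dom_is_repeat bases unit → Pre_is_repeat bases unit → Spec_is_repeat bases unit (is_repeat bases unit)

-- ===== LEMMAS AND PROOFS =====

-- Main list-level fact: all unit-length chunks equal `us` iff the whole list is n copies of `us`.
theorem chunks_eq_iff_flatten {us : List Char} (n : ℕ) (bs : List Char)
    (hlen : bs.length = n * us.length) :
    ((∀ k < n, (bs.drop (k * us.length)).take us.length = us) ↔
      bs = (List.replicate n us).flatten) := by
  induction n generalizing bs with
  | zero =>
    have hbs : bs = [] := by
      have : bs.length = 0 := by simpa using hlen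
      exact List.length_eq_zero_iff.mp this
    subst hbs
    simp
  | succ n ih =>
    have hdlen : (bs.drop us.length).length = n * us.length := by
      rw [List.length_drop, hlen, Nat.succ_mul, Nat.add_sub_cancel]
    have hrec := ih (bs.drop us.length) hdlen
    constructor
    · intro h
      have h0 : bs.take us.length = us := by
        have := h 0 (by omega); simpa using this
      have hrest : bs.drop us.length = (List.replicate n us).flatten := by
        apply hrec.mp
        intro k hk
        have := h (k + 1) (by omega)
        have hdd : (bs.drop us.length).drop (k * us.length) = bs.drop ((k + 1) * us.length) := by
          rw [List.drop_drop]; ring_nf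
        rw [hdd]; exact this
      calc bs = bs.take us.length ++ bs.drop us.length := (List.take_append_drop _ _).symm
        _ = us ++ (List.replicate n us).flatten := by rw [h0, hrest]
        _ = (List.replicate (n + 1) us).flatten := by
              rw [List.replicate_succ, List.flatten_cons]
    · intro h k hk
      have hbs : bs = us ++ (List.replicate n us).flatten := by
        rw [h, List.replicate_succ, List.flatten_cons]
      have h0 : bs.take us.length = us := by
        rw [hbs]; simp
      have hdrop : bs.drop us.length = (List.replicate n us).flatten := by
        rw [hbs]; simp
      match k with
      | 0 => simpa using h0
      | k + 1 =>
        have := hrec.mpr hdrop k (by omega)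
        have hdd : (bs.drop us.length).drop (k * us.length) = bs.drop ((k + 1) * us.length) := by
          rw [List.drop_drop]; ring_nf
        rw [hdd] at this
        exact this

theorem is_repeat_eq_alt (bases unit : String) :
    is_repeat bases unit = is_repeat_alt bases unit := by
  unfold is_repeat is_repeat_alt
  simp only [PySem.Str.len_eq, PySem.Int.mod_natCast, PySem.Int.floordiv_natCast]
  set bs := bases.toList with hbs
  set us := unit.toList with hus
  set m := bs.length
  set ul := us.length
  by_cases hmod : m % ul = 0
  · simp only [hmod, Nat.cast_zero, beq_self_eq_true, if_true, Bool.true_and]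
    set n := m / ul with hn
    have hlen : bs.length = n * ul := by
      have h2 := Nat.div_mul_cancel (Nat.dvd_of_mod_eq_zero hmod)
      calc bs.length = m := rfl
        _ = m / ul * ul := h2.symm
        _ = n * ul := rfl
    rw [Bool.eq_iff_iff]
    simp only [List.all_eq_true, beq_iff_eq, PySem.List.mem_pyRange_one,
      PySem.List.pyRepeat, Int.toNat_natCast]
    rw [← chunks_eq_iff_flatten n bs hlen]
    constructor
    · intro h k hk
      have hx := h (k : Int) ⟨by positivity, by exact_mod_cast hk⟩
      have hc : ((k : Int) * (ul : Int)) = ((k * ul : ℕ) : Int) := by push_cast; ring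
      rw [hc, PySem.List.slice_natCast_add] at hx
      exact hx
    · intro h x hx
      obtain ⟨hx0, hxn⟩ := hx
      obtain ⟨k, rfl⟩ : ∃ k : ℕ, x = (k : Int) := ⟨x.toNat, by omega⟩
      have hk : k < n := by exact_mod_cast hxn
      have hc : ((k : Int) * (ul : Int)) = ((k * ul : ℕ) : Int) := by push_cast; ring
      rw [hc, PySem.List.slice_natCast_add]
      exact h k hk
  · have h1 : ((((m % ul : ℕ) : Int)) == 0) = false := by
      simp only [beq_eq_false_iff_ne, ne_eq]
      exact_mod_cast hmod
    rw [h1]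
    simp

-- ===== VERDICT (by name: the statement is the Claim_ definition above) =====
theorem is_repeat_spec : Claim_equal_is_repeat := by
  intro bases unit _ _
  unfold Spec_is_repeat
  exact is_repeat_eq_alt bases unit
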